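-- pv_equiv track=rewrite | github.com/dvishwajith/shortnoteCPP | languages/python/algorithms/graphs/questions/connected_component_count/max_connected_component.py | connectedcount
-- ===== SOURCE A (Python) =====
-- def connecteditems(graph, start, visited):
--     if start in visited:
--         return 0
--     else:
--         visited.add(start)
--         count = 1
--         for child in graph[start]:
--             count += connecteditems(graph, child, visited)
--         return count
--
-- def connectedcount(graph):
--     visited = set()
--     maxcomponentnumber = -1
--     largest_connected_graph = -1
--     for keynode in graph:
--         if keynode not in visited:
--             numberofcomponents = connecteditems(graph, keynode, visited)
--             if numberofcomponents > maxcomponentnumber: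
--                 largest_connected_graph = keynode
--                 maxcomponentnumber = numberofcomponents
--     return largest_connected_graph
-- ===== SOURCE B (Python) =====
-- def connectedcount(graph):
--     visited = set()
--     comps = []  # (size, root) of each component, in discovery order
--     for root in graph:
--         if root not in visited:
--             stack = [root]
--             size = 0
--             while stack:
--                 node = stack.pop()
--                 if node not in visited:
--                     visited.add(node)
--                     size += 1
--                     stack.extend(reversed(graph[node]))
--             comps.append((size, root))
--     best_size = -1
--     best_root = -1
--     for size, root in comps:
--         if size > best_size:
--             best_size = size
--             best_root = root
--     return best_root
-- ===== Notes on version B (the rewrite author's own statement) =====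
-- stated objective: alternative
-- what changed: A's recursive depth-first helper with a running max is replaced by two staged passes: an iterative DFS with an explicit stack collects a (size, root) list of components in discovery order, and a separate selection pass then picks the first root of strictly maximal size; same return value, different traversal machinery and decomposition.
import Mathlib
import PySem

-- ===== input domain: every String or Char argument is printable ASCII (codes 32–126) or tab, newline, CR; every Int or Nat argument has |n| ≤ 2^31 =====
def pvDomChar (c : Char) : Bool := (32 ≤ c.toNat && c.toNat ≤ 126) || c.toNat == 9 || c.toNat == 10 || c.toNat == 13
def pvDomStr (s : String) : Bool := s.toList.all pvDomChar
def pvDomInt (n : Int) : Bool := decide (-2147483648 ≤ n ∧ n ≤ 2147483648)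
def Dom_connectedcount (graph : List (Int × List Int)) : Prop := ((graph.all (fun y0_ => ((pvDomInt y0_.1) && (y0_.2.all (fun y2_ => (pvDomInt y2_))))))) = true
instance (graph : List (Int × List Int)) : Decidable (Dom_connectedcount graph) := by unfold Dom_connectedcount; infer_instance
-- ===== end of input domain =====

-- B replaces A's recursive depth-first helper + running max by two staged passes: an iterative
-- DFS with an explicit stack collects a (size, root) list per component, then a separate pass
-- picks the first root of strictly maximal size — alternative decomposition, not faster.
-- Pre_ excludes association lists with duplicate keys (a Python dict cannot carry them, so any
-- behaviour of the list ports there is accidental) and graphs listing a child that is not a key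
-- (there Python A raises KeyError; B raises the same KeyError).


-- ===== PORT A =====
-- graph[x] on the Python dict: first-match lookup in the association list
def pvAdj (g : List (Int × List Int)) (x : Int) : Option (List Int) :=
  PySem.Dict.get? (PySem.Dict.mk g) x

mutual
-- connecteditems(graph, start, visited): returns (count, visited'); none = KeyError.
-- fuel is a totality guard only: it decreases exactly when a node is marked, and g.length + 1
-- marks can never be reached (each mark adds a distinct key to visited) — proved below.
def connItems (g : List (Int × List Int)) (fuel : Nat) (start : Int) (v : PySem.Set Int) :
    Option (Int × PySem.Set Int) :=
  if start ∈ v then some (0, v)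
  else
    match fuel with
    | 0 => none
    | f + 1 =>
      match pvAdj g start with
      | none => none
      | some ch =>
        match connList g f ch (PySem.Set.add v start) with
        | none => none
        | some (k, v') => some (1 + k, v')
termination_by (fuel, 0)

-- the 'for child in graph[start]' loop: count accumulated over the children in order
def connList (g : List (Int × List Int)) (fuel : Nat) (cs : List Int) (v : PySem.Set Int) :
    Option (Int × PySem.Set Int) :=
  match cs with
  | [] => some (0, v)
  | c :: rest =>
    match connItems g fuel c v with
    | none => none
    | some (k1, v1) =>
      match connList g fuel rest v1 with
      | none => none
      | some (k2, v2) => some (k1 + k2, v2)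
termination_by (fuel, cs.length + 1)
end

-- one iteration of A's 'for keynode in graph' loop; state = (visited, maxcomponentnumber,
-- largest_connected_graph), none = a KeyError has been raised
def stepA (graph : List (Int × List Int)) (st : Option (PySem.Set Int × Int × Int)) (k : Int) :
    Option (PySem.Set Int × Int × Int) :=
  match st with
  | none => none
  | some (v, maxc, lgc) =>
    if k ∈ v then some (v, maxc, lgc)
    else
      match connItems graph (graph.length + 1) k v with
      | none => none
      | some (n, v') =>
        if n > maxc then some (v', n, k) else some (v', maxc, lgc)

def connectedcount (graph : List (Int × List Int)) : Int :=
  match (graph.map Prod.fst).foldl (stepA graph)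
      (some ((PySem.Set.empty : PySem.Set Int), (-1 : Int), (-1 : Int))) with
  | some (_, _, lgc) => lgc
  | none => 0  -- KeyError path; outside Pre_connectedcount

-- ===== PORT B =====
-- Source B's 'while stack' loop; the Lean list holds the stack top first, so Python's
-- stack.pop() is the head and stack.extend(reversed(graph[node])) is 'ch ++ s'.
-- Returns (size, visited'); none = KeyError; fuel as in port A (decreases per mark).
def stackLoop (g : List (Int × List Int)) (fuel : Nat) (stack : List Int) (v : PySem.Set Int)
    (size : Int) : Option (Int × PySem.Set Int) :=
  match stack with
  | [] => some (size, v)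
  | x :: s =>
    if x ∈ v then stackLoop g fuel s v size
    else
      match fuel with
      | 0 => none
      | f + 1 =>
        match PySem.Dict.get? (PySem.Dict.mk g) x with
        | none => none
        | some ch => stackLoop g f (ch ++ s) (PySem.Set.add v x) (size + 1)
termination_by (fuel, stack.length)

-- first pass of Source B: walk the keys, DFS each unvisited root, collect (size, root) in order
def collectComps (g : List (Int × List Int)) (keys : List Int) (v : PySem.Set Int) :
    Option (List (Int × Int) × PySem.Set Int) :=
  match keys with
  | [] => some ([], v)
  | r :: ks =>
    if r ∈ v then collectComps g ks v
    else
      match stackLoop g (g.length + 1) [r] v 0 with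
      | none => none
      | some (n, v') =>
        match collectComps g ks v' with
        | none => none
        | some (cs, v'') => some ((n, r) :: cs, v'')

-- second pass of Source B: first root of strictly maximal size, starting from (-1, -1)
def pickBest (comps : List (Int × Int)) : Int :=
  (comps.foldl (fun best p => if p.1 > best.1 then p else best) ((-1 : Int), (-1 : Int))).2

def connectedcount_alt (graph : List (Int × List Int)) : Int :=
  match collectComps graph (graph.map Prod.fst) PySem.Set.empty with
  | none => 0  -- KeyError path; outside Pre_connectedcount
  | some (cs, _) => pickBest cs

-- ===== PRECONDITION & SPEC =====
-- every child listed anywhere is itself a key (otherwise the traversal reaches it and A raises KeyError)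
def pvClosed (g : List (Int × List Int)) : Prop :=
  ∀ p ∈ g, ∀ c ∈ p.2, c ∈ g.map Prod.fst

-- Pre_ excludes (a) duplicate keys — a Python dict cannot carry them, so the association-list
-- behaviour there is accidental — and (b) graphs with a child that is not a key, where A raises KeyError.
def Pre_connectedcount (graph : List (Int × List Int)) : Prop :=
  (graph.map Prod.fst).Nodup ∧ pvClosed graph

instance (graph : List (Int × List Int)) : Decidable (Pre_connectedcount graph) := by
  unfold Pre_connectedcount pvClosed; infer_instance

def pvWitness_connectedcount : (List (Int × List Int)) := [(0, [1]), (1, [0]), (2, [])]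

def Spec_connectedcount (graph : List (Int × List Int)) (out : Int) : Prop := out = connectedcount_alt graph
instance (graph : List (Int × List Int)) (out : Int) : Decidable (Spec_connectedcount graph out) := by unfold Spec_connectedcount; infer_instance

-- ===== CLAIM (what is proved, stated in full; the proofs are below) =====
def Claim_equal_connectedcount : Prop := ∀ (graph : List (Int × List Int)), Dom_connectedcount graph → Pre_connectedcount graph → Spec_connectedcount graph (connectedcount graph)

-- ===== LEMMAS AND PROOFS =====

-- number of keys not yet visited: the fuel measure
def pvKN (g : List (Int × List Int)) (v : PySem.Set Int) : Nat :=
  List.countP (fun k => !(decide (k ∈ v))) (PySem.List.dedup (g.map Prod.fst))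

theorem pv_countP_lt (l : List Int) (p q : Int → Bool) (x : Int) (hx : x ∈ l)
    (hpx : p x = true) (hqx : q x = false) (himp : ∀ y, q y = true → p y = true) :
    l.countP q < l.countP p := by
  induction l with
  | nil => cases hx
  | cons a l ih =>
    rw [List.mem_cons] at hx
    simp only [List.countP_cons]
    rcases hx with h | h
    · subst h
      rw [hpx, hqx]
      have := List.countP_mono_left (l := l) (p := q) (q := p) (fun y _ hy => himp y hy)
      simp only [if_true, Bool.false_eq_true, if_false]
      omega
    · have hlt := ih h
      have hle : (if q a = true then 1 else 0) ≤ (if p a = true then 1 else 0) := by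
        by_cases hq : q a = true
        · rw [if_pos hq, if_pos (himp a hq)]
        · rw [if_neg hq]; exact Nat.zero_le _
      omega

theorem pvKN_le (g : List (Int × List Int)) (v : PySem.Set Int) : pvKN g v ≤ g.length := by
  unfold pvKN
  calc List.countP _ (PySem.List.dedup (g.map Prod.fst)) ≤ (PySem.List.dedup (g.map Prod.fst)).length :=
        List.countP_le_length
    _ ≤ (g.map Prod.fst).length := by
        rw [PySem.List.dedup_eq_ofList]; exact PySem.Set.length_ofList_le _
    _ = g.length := List.length_map ..

theorem pvKN_mono (g : List (Int × List Int)) (v v' : PySem.Set Int)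
    (h : ∀ y, y ∈ v → y ∈ v') : pvKN g v' ≤ pvKN g v := by
  unfold pvKN
  refine List.countP_mono_left (fun y _ hy => ?_)
  simp only [Bool.not_eq_eq_eq_not, Bool.not_true, decide_eq_false_iff_not] at *
  exact fun hyv => hy (h y hyv)

theorem pvKN_add_lt (g : List (Int × List Int)) (v : PySem.Set Int) (x : Int)
    (hx : x ∈ g.map Prod.fst) (hv : x ∉ v) : pvKN g (PySem.Set.add v x) < pvKN g v := by
  unfold pvKN
  refine pv_countP_lt _ _ _ x ?_ ?_ ?_ ?_
  · rw [PySem.List.dedup_eq_ofList, PySem.Set.mem_ofList]; exact hx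
  · simp [hv]
  · simp [PySem.Set.mem_add]
  · intro y hy
    simp only [Bool.not_eq_eq_eq_not, Bool.not_true, decide_eq_false_iff_not,
      PySem.Set.mem_add] at *
    exact fun hyv => hy (Or.inl hyv)

theorem pvAdj_mem (g : List (Int × List Int)) (x : Int) (ch : List Int)
    (h : pvAdj g x = some ch) : x ∈ g.map Prod.fst := by
  induction g with
  | nil => simp [pvAdj, PySem.Dict.get?] at h
  | cons p g ih =>
    obtain ⟨k, vs⟩ := p
    rw [pvAdj, PySem.Dict.get?_mk_cons] at h
    by_cases hk : k = x
    · simp [hk]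
    · simp only [beq_iff_eq, hk, if_false] at h
      exact List.mem_cons_of_mem _ (ih h)

theorem pvAdj_isSome (g : List (Int × List Int)) (x : Int) (hx : x ∈ g.map Prod.fst) :
    ∃ ch, pvAdj g x = some ch := by
  induction g with
  | nil => simp at hx
  | cons p g ih =>
    obtain ⟨k, vs⟩ := p
    rw [pvAdj, PySem.Dict.get?_mk_cons]
    by_cases hk : k = x
    · exact ⟨vs, by simp [hk]⟩
    · simp only [List.map_cons, List.mem_cons] at hx
      rcases hx with h | h
      · exact absurd h.symm hk
      · simpa [beq_iff_eq, hk] using ih h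

theorem pvAdj_pair (g : List (Int × List Int)) (x : Int) (ch : List Int)
    (h : pvAdj g x = some ch) : (x, ch) ∈ g := by
  induction g with
  | nil => simp [pvAdj, PySem.Dict.get?] at h
  | cons p g ih =>
    obtain ⟨k, vs⟩ := p
    rw [pvAdj, PySem.Dict.get?_mk_cons] at h
    by_cases hk : k = x
    · simp only [hk, beq_self_eq_true, if_true, Option.some.injEq] at h
      subst h; subst hk; exact List.mem_cons_self ..
    · simp only [beq_iff_eq, hk, if_false] at h
      exact List.mem_cons_of_mem _ (ih h)

theorem pvAdj_closed (g : List (Int × List Int)) (x : Int) (ch : List Int)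
    (hc : pvClosed g) (h : pvAdj g x = some ch) : ∀ c ∈ ch, c ∈ g.map Prod.fst :=
  fun c hcch => hc (x, ch) (pvAdj_pair g x ch h) c hcch

-- unfolding equations for the loops, in Option.bind form
theorem connList_nil (g : List (Int × List Int)) (f : Nat) (v : PySem.Set Int) :
    connList g f [] v = some (0, v) := by rw [connList.eq_def]

theorem connList_cons (g : List (Int × List Int)) (f : Nat) (c : Int) (rest : List Int)
    (v : PySem.Set Int) :
    connList g f (c :: rest) v = (connItems g f c v).bind (fun p =>
      (connList g f rest p.2).bind (fun q => some (p.1 + q.1, q.2))) := by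
  rw [connList.eq_def]
  dsimp only
  cases connItems g f c v with
  | none => rfl
  | some p =>
    obtain ⟨k1, v1⟩ := p
    simp only [Option.bind_some]
    cases connList g f rest v1 with
    | none => rfl
    | some q => obtain ⟨k2, v2⟩ := q; rfl

theorem connItems_mem (g : List (Int × List Int)) (f : Nat) (x : Int) (v : PySem.Set Int)
    (hx : x ∈ v) : connItems g f x v = some (0, v) := by
  rw [connItems.eq_def, if_pos hx]

theorem connItems_zero (g : List (Int × List Int)) (x : Int) (v : PySem.Set Int)
    (hx : x ∉ v) : connItems g 0 x v = none := by
  rw [connItems.eq_def, if_neg hx]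

theorem connItems_succ (g : List (Int × List Int)) (f : Nat) (x : Int) (v : PySem.Set Int)
    (hx : x ∉ v) :
    connItems g (f + 1) x v = (pvAdj g x).bind (fun ch =>
      (connList g f ch (PySem.Set.add v x)).map (fun p => (1 + p.1, p.2))) := by
  rw [connItems.eq_def, if_neg hx]
  dsimp only
  cases pvAdj g x with
  | none => rfl
  | some ch =>
    simp only [Option.bind_some]
    cases connList g f ch (PySem.Set.add v x) with
    | none => rfl
    | some p => obtain ⟨k, v'⟩ := p; rfl

theorem stackLoop_nil (g : List (Int × List Int)) (f : Nat) (v : PySem.Set Int) (cnt : Int) :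
    stackLoop g f [] v cnt = some (cnt, v) := by rw [stackLoop.eq_def]

theorem stackLoop_mem (g : List (Int × List Int)) (f : Nat) (x : Int) (s : List Int)
    (v : PySem.Set Int) (cnt : Int) (hx : x ∈ v) :
    stackLoop g f (x :: s) v cnt = stackLoop g f s v cnt := by
  rw [stackLoop.eq_def]; exact if_pos hx

theorem stackLoop_new (g : List (Int × List Int)) (f : Nat) (x : Int) (s : List Int)
    (v : PySem.Set Int) (cnt : Int) (hx : x ∉ v) :
    stackLoop g (f + 1) (x :: s) v cnt = (pvAdj g x).bind (fun ch =>
      stackLoop g f (ch ++ s) (PySem.Set.add v x) (cnt + 1)) := by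
  rw [stackLoop.eq_def]
  dsimp only
  rw [if_neg hx]
  unfold pvAdj
  cases PySem.Dict.get? (PySem.Dict.mk g) x with
  | none => rfl
  | some ch => rfl

-- monotonicity of the visited set
theorem connList_mono_of (g : List (Int × List Int)) (f : Nat)
    (hCI : ∀ x v k v', connItems g f x v = some (k, v') → ∀ y, y ∈ v → y ∈ v') :
    ∀ cs v k v', connList g f cs v = some (k, v') → ∀ y, y ∈ v → y ∈ v' := by
  intro cs
  induction cs with
  | nil => intro v k v' h y hy; rw [connList_nil] at h; cases h; exact hy
  | cons c rest ih =>
    intro v k v' h y hy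
    rw [connList_cons] at h
    cases hci : connItems g f c v with
    | none => rw [hci] at h; cases h
    | some p =>
      obtain ⟨k1, v1⟩ := p
      rw [hci] at h
      simp only [Option.bind_some] at h
      cases hcl : connList g f rest v1 with
      | none => rw [hcl] at h; cases h
      | some q =>
        obtain ⟨k2, v2⟩ := q
        rw [hcl] at h
        simp only [Option.bind_some] at h
        cases h
        exact ih _ _ _ hcl y (hCI _ _ _ _ hci y hy)

theorem conn_mono (g : List (Int × List Int)) (f : Nat) :
    (∀ x v k v', connItems g f x v = some (k, v') → ∀ y, y ∈ v → y ∈ v') ∧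
    (∀ cs v k v', connList g f cs v = some (k, v') → ∀ y, y ∈ v → y ∈ v') := by
  induction f with
  | zero =>
    have hCI : ∀ x v k v', connItems g 0 x v = some (k, v') → ∀ y, y ∈ v → y ∈ v' := by
      intro x v k v' h y hy
      by_cases hx : x ∈ v
      · rw [connItems_mem g 0 x v hx] at h; cases h; exact hy
      · rw [connItems_zero g x v hx] at h; cases h
    exact ⟨hCI, connList_mono_of g 0 hCI⟩
  | succ f ihf =>
    have hCI : ∀ x v k v', connItems g (f + 1) x v = some (k, v') → ∀ y, y ∈ v → y ∈ v' := by
      intro x v k v' h y hy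
      by_cases hx : x ∈ v
      · rw [connItems_mem g _ x v hx] at h; cases h; exact hy
      · rw [connItems_succ g f x v hx] at h
        cases hadj : pvAdj g x with
        | none => rw [hadj] at h; cases h
        | some ch =>
          rw [hadj] at h
          simp only [Option.bind_some] at h
          cases hcl : connList g f ch (PySem.Set.add v x) with
          | none => rw [hcl] at h; cases h
          | some p =>
            obtain ⟨k1, v1⟩ := p
            rw [hcl] at h
            simp only [Option.map_some] at h
            cases h
            exact ihf.2 ch _ _ _ hcl y (by rw [PySem.Set.mem_add]; exact Or.inl hy)
    exact ⟨hCI, connList_mono_of g (f + 1) hCI⟩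

theorem conn_total (g : List (Int × List Int)) (hc : pvClosed g) (f : Nat) :
    (∀ x v, x ∈ g.map Prod.fst → pvKN g v < f → ∃ k v', connItems g f x v = some (k, v')) ∧
    (∀ cs v, (∀ c ∈ cs, c ∈ g.map Prod.fst) → pvKN g v < f → ∃ k v', connList g f cs v = some (k, v')) := by
  induction f with
  | zero => exact ⟨fun _ _ _ h => absurd h (Nat.not_lt_zero _),
      fun _ _ _ h => absurd h (Nat.not_lt_zero _)⟩
  | succ f ihf =>
    have hCI : ∀ x v, x ∈ g.map Prod.fst → pvKN g v < f + 1 →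
        ∃ k v', connItems g (f + 1) x v = some (k, v') := by
      intro x v hxk h1
      by_cases hx : x ∈ v
      · exact ⟨0, v, connItems_mem g _ x v hx⟩
      · obtain ⟨ch, hadj⟩ := pvAdj_isSome g x hxk
        have hlt := pvKN_add_lt g v x hxk hx
        obtain ⟨k, v', hcl⟩ := ihf.2 ch (PySem.Set.add v x)
          (pvAdj_closed g x ch hc hadj) (by omega)
        refine ⟨1 + k, v', ?_⟩
        rw [connItems_succ g f x v hx, hadj]
        simp only [Option.bind_some]
        rw [hcl]
        rfl
    refine ⟨hCI, ?_⟩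
    intro cs
    induction cs with
    | nil => exact fun v _ _ => ⟨0, v, connList_nil g _ v⟩
    | cons c rest ih =>
      intro v hsub h1
      obtain ⟨k1, v1, hci⟩ := hCI c v (hsub c (List.mem_cons_self ..)) h1
      have hmono := (conn_mono g (f + 1)).1 c v k1 v1 hci
      have hle := pvKN_mono g v v1 hmono
      obtain ⟨k2, v2, hcl⟩ := ih v1 (fun c' h => hsub c' (List.mem_cons_of_mem _ h)) (by omega)
      refine ⟨k1 + k2, v2, ?_⟩
      rw [connList_cons, hci]
      simp only [Option.bind_some]
      rw [hcl]
      rfl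

theorem stack_irrel (g : List (Int × List Int)) (f1 : Nat) :
    ∀ f2 stack v cnt, pvKN g v < f1 → pvKN g v < f2 →
      stackLoop g f1 stack v cnt = stackLoop g f2 stack v cnt := by
  induction f1 with
  | zero => exact fun _ _ _ _ h _ => absurd h (Nat.not_lt_zero _)
  | succ f ihf =>
    intro f2 stack
    induction stack with
    | nil => intro v cnt _ _; rw [stackLoop_nil, stackLoop_nil]
    | cons x s ihs =>
      intro v cnt h1 h2
      by_cases hx : x ∈ v
      · rw [stackLoop_mem g _ x s v cnt hx, stackLoop_mem g _ x s v cnt hx]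
        exact ihs v cnt h1 h2
      · obtain ⟨f2', rfl⟩ : ∃ f2', f2 = f2' + 1 := ⟨f2 - 1, by omega⟩
        rw [stackLoop_new g f x s v cnt hx, stackLoop_new g f2' x s v cnt hx]
        cases hadj : pvAdj g x with
        | none => rfl
        | some ch =>
          simp only [Option.bind_some]
          have hxk := pvAdj_mem g x ch hadj
          have hlt := pvKN_add_lt g v x hxk hx
          exact ihf f2' (ch ++ s) (PySem.Set.add v x) (cnt + 1) (by omega) (by omega)

-- bridge: running the stack on 'seeds ++ rest' first performs exactly the recursive
-- traversal of seeds (connList), then continues with rest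
theorem bridge (g : List (Int × List Int)) (hc : pvClosed g) (n : Nat) :
    ∀ v, pvKN g v ≤ n → ∀ seeds rest cnt f1 fc f2 k v',
      (∀ c ∈ seeds, c ∈ g.map Prod.fst) → pvKN g v < f1 → pvKN g v < fc → pvKN g v' < f2 →
      connList g fc seeds v = some (k, v') →
      stackLoop g f1 (seeds ++ rest) v cnt = stackLoop g f2 rest v' (cnt + k) := by
  induction n using Nat.strong_induction_on with
  | _ n ihn =>
  intro v hvn seeds
  induction seeds with
  | nil =>
    intro rest cnt f1 fc f2 k v' _ h1 _ h3 hcl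
    rw [connList_nil] at hcl
    cases hcl
    rw [List.nil_append, add_zero]
    exact stack_irrel g f1 f2 rest v cnt h1 h3
  | cons x xs ihs =>
    intro rest cnt f1 fc f2 k v' hsub h1 h2 h3 hcl
    have hsub' : ∀ c ∈ xs, c ∈ g.map Prod.fst := fun c h => hsub c (List.mem_cons_of_mem _ h)
    rw [connList_cons] at hcl
    by_cases hx : x ∈ v
    · rw [connItems_mem g fc x v hx] at hcl
      simp only [Option.bind_some] at hcl
      cases hcl2 : connList g fc xs v with
      | none => rw [hcl2] at hcl; cases hcl
      | some q =>
        obtain ⟨k2, v2⟩ := q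
        rw [hcl2] at hcl
        simp only [Option.bind_some] at hcl
        cases hcl
        rw [List.cons_append, stackLoop_mem g f1 x (xs ++ rest) v cnt hx, zero_add]
        exact ihs rest cnt f1 fc f2 _ _ hsub' h1 h2 h3 hcl2
    · obtain ⟨fcc, rfl⟩ : ∃ fcc, fc = fcc + 1 := ⟨fc - 1, by omega⟩
      rw [connItems_succ g fcc x v hx] at hcl
      cases hadj : pvAdj g x with
      | none => rw [hadj] at hcl; cases hcl
      | some ch =>
        rw [hadj] at hcl
        simp only [Option.bind_some] at hcl
        cases hclc : connList g fcc ch (PySem.Set.add v x) with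
        | none => rw [hclc] at hcl; cases hcl
        | some p =>
          obtain ⟨kc, v2c⟩ := p
          rw [hclc] at hcl
          simp only [Option.map_some, Option.bind_some] at hcl
          cases hclxs : connList g (fcc + 1) xs v2c with
          | none => rw [hclxs] at hcl; cases hcl
          | some q =>
            obtain ⟨k2, v2⟩ := q
            rw [hclxs] at hcl
            simp only [Option.bind_some] at hcl
            cases hcl
            have hxk := pvAdj_mem g x ch hadj
            have hlt := pvKN_add_lt g v x hxk hx
            have hmono1 := connList_mono_of g fcc (conn_mono g fcc).1 ch _ _ _ hclc
            have hle1 := pvKN_mono g (PySem.Set.add v x) v2c hmono1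
            obtain ⟨f1', rfl⟩ : ∃ f1', f1 = f1' + 1 := ⟨f1 - 1, by omega⟩
            rw [List.cons_append, stackLoop_new g f1' x (xs ++ rest) v cnt hx, hadj]
            simp only [Option.bind_some]
            have step1 := ihn (pvKN g (PySem.Set.add v x)) (by omega)
              (PySem.Set.add v x) le_rfl ch (xs ++ rest) (cnt + 1) f1' fcc
              (pvKN g v2c + 1) kc v2c (pvAdj_closed g x ch hc hadj)
              (by omega) (by omega) (Nat.lt_succ_self _) hclc
            have step2 := ihn (pvKN g v2c) (by omega) v2c le_rfl xs rest
              (cnt + 1 + kc) (pvKN g v2c + 1) (fcc + 1) f2 _ _ hsub'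
              (Nat.lt_succ_self _) (by omega) h3 hclxs
            rw [step1, step2]
            have : cnt + 1 + kc + k2 = cnt + (1 + kc + k2) := by ring
            rw [this]

-- one unvisited key: A's recursive traversal = B's stack traversal
theorem per_key (g : List (Int × List Int)) (hc : pvClosed g) (k : Int) (v : PySem.Set Int)
    (hk : k ∈ g.map Prod.fst) (hv : k ∉ v) :
    connItems g (g.length + 1) k v = stackLoop g (g.length + 1) [k] v 0 := by
  have hb0 : pvKN g v ≤ g.length := pvKN_le g v
  obtain ⟨ch, hadj⟩ := pvAdj_isSome g k hk
  have hlt := pvKN_add_lt g v k hk hv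
  obtain ⟨kc, v2, hclc⟩ := (conn_total g hc g.length).2 ch (PySem.Set.add v k)
    (pvAdj_closed g k ch hc hadj) (by omega)
  rw [connItems_succ g g.length k v hv, hadj]
  simp only [Option.bind_some]
  rw [hclc]
  rw [stackLoop_new g g.length k [] v 0 hv, hadj]
  simp only [Option.bind_some]
  have hbridge := bridge g hc (pvKN g (PySem.Set.add v k)) (PySem.Set.add v k) le_rfl
    ch [] (0 + 1) g.length g.length (pvKN g v2 + 1) kc v2
    (pvAdj_closed g k ch hc hadj) (by omega) (by omega) (Nat.lt_succ_self _) hclc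
  rw [List.append_nil] at *
  rw [hbridge, stackLoop_nil]
  simp only [Option.map_some]
  have : (0 : Int) + 1 + kc = 1 + kc := by ring
  rw [this]

-- A's running-max fold over the keys = B's collect pass followed by the selection fold
theorem fold_collect (g : List (Int × List Int)) (hc : pvClosed g) :
    ∀ l : List Int, (∀ k ∈ l, k ∈ g.map Prod.fst) → ∀ (v : PySem.Set Int) (best : Int × Int),
      ∃ cs v', collectComps g l v = some (cs, v') ∧
        l.foldl (stepA g) (some (v, best)) =
          some (v', cs.foldl (fun b p => if p.1 > b.1 then p else b) best) := by
  intro l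
  induction l with
  | nil => exact fun _ v best => ⟨[], v, rfl, rfl⟩
  | cons k l ih =>
    intro hsub v best
    have hk := hsub k (List.mem_cons_self ..)
    have hsub' : ∀ k' ∈ l, k' ∈ g.map Prod.fst := fun k' h => hsub k' (List.mem_cons_of_mem _ h)
    by_cases hkv : k ∈ v
    · obtain ⟨cs, v', hcol, hfold⟩ := ih hsub' v best
      refine ⟨cs, v', ?_, ?_⟩
      · rw [collectComps, if_pos hkv]; exact hcol
      · obtain ⟨maxc, lgc⟩ := best
        rw [List.foldl_cons]
        simp only [stepA, if_pos hkv]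
        exact hfold
    · have hb : pvKN g v ≤ g.length := pvKN_le g v
      obtain ⟨n, v1, hci⟩ := (conn_total g hc (g.length + 1)).1 k v hk (by omega)
      have hsl : stackLoop g (g.length + 1) [k] v 0 = some (n, v1) := by
        rw [← per_key g hc k v hk hkv]; exact hci
      obtain ⟨cs, v', hcol, hfold⟩ :=
        ih hsub' v1 (if n > best.1 then (n, k) else best)
      refine ⟨(n, k) :: cs, v', ?_, ?_⟩
      · rw [collectComps, if_neg hkv, hsl]
        dsimp only
        rw [hcol]
      · obtain ⟨maxc, lgc⟩ := best
        rw [List.foldl_cons]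
        simp only [stepA, if_neg hkv, hci]
        rw [List.foldl_cons]
        by_cases hgt : n > maxc
        · simpa [hgt] using hfold
        · simpa [hgt] using hfold

-- ===== VERDICT (by name: the statement is the Claim_ definition above) =====
theorem connectedcount_spec : Claim_equal_connectedcount := by
  intro g _ hpre
  obtain ⟨_, hc⟩ := hpre
  obtain ⟨cs, v', hcol, hfold⟩ :=
    fold_collect g hc (g.map Prod.fst) (fun k h => h) PySem.Set.empty ((-1 : Int), (-1 : Int))
  unfold Spec_connectedcount connectedcount connectedcount_alt
  rw [hcol, hfold]
  rfl
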